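-- pv_equiv track=rewrite | github.com/shmulikor/automated_reasoning | UF_solver.py | parse_function_arguments
-- ===== SOURCE A (Python) =====
-- def parse_function_arguments(func_arg):
--     # divides arguments "list" into parts, each is a valid term
--     arg_list = []
--     comma_idx = [i for i, ltr in enumerate(func_arg) if ltr == ','] + [len(func_arg)]
--     last_idx = 0
--     # Check if each comma is has same number of ( and ) before it. if so, slice the string
--     for idx in comma_idx:
--         take_index = last_idx if not last_idx else last_idx + 1
--         if func_arg[take_index:idx].count('(') == func_arg[take_index:idx].count(')'):
--             arg_list.append(func_arg[take_index:idx])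
--             last_idx = idx
--     return arg_list
-- ===== SOURCE B (Python) =====
-- def parse_function_arguments(func_arg):
--     # Single pass: split at commas where the running '('/')' balance is zero.
--     args = []
--     buf = []
--     depth = 0
--     for ch in func_arg:
--         if ch == ',' and depth == 0:
--             args.append(''.join(buf))
--             buf = []
--         else:
--             if ch == '(':
--                 depth += 1
--             elif ch == ')':
--                 depth -= 1
--             buf.append(ch)
--     if depth == 0:
--         args.append(''.join(buf))
--     return args
-- ===== Notes on version B (the rewrite author's own statement) =====
-- stated objective: alternative
-- what changed: Replaced the precomputed comma-index list with per-candidate substring slicing and paren re-counting by a single left-to-right pass that keeps a running parenthesis depth and emits the buffered segment at each depth-zero comma.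
-- intended difference: On strings whose first character is a comma and whose tail has a parenthesis-balanced split point, the falsy test on last_idx in A treats the successful split at index 0 as if no split had happened and leaves the leading comma inside the next emitted segment (',a' -> ['', ',a']), while B returns ['', 'a'], the intended split. — e.g. on parse_function_arguments(","): A returns ["", ","], B returns ["", ""]
import Mathlib
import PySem

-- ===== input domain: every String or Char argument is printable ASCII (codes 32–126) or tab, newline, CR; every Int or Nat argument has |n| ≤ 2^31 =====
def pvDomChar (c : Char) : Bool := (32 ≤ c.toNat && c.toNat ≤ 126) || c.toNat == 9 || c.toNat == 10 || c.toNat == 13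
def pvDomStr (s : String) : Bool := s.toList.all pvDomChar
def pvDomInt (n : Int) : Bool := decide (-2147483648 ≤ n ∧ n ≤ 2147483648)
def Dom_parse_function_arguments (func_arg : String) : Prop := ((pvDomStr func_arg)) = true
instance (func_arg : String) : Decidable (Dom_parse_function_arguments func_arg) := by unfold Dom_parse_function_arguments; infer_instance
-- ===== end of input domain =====

-- B replaces A's comma-index list with per-candidate substring slicing and re-counting by a single
-- left-to-right pass with a running parenthesis depth; on strings starting with ',' whose tail has a
-- balanced split point, A keeps the leading comma in the next segment and B returns the intended split
-- (see D_ below).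

-- ===== PORT A =====
-- the body of A's for-loop (take_index / slice / count / conditional append), one fold step
def pvAstep (func_arg : String) (st : List String × Int) (idx : Int) : List String × Int :=
  let take_index : Int := if st.2 = 0 then st.2 else st.2 + 1
  let seg : String := PySem.Str.slice func_arg (some take_index) (some idx)
  if PySem.Str.count seg "(" = PySem.Str.count seg ")" then
    (st.1 ++ [seg], idx)
  else
    st

def parse_function_arguments (func_arg : String) : List String :=
  let comma_idx : List Int :=
    ((PySem.List.enumerate func_arg.toList 0).filter (fun p => p.2 == ',')).map (fun p => p.1)
      ++ [(PySem.Str.len func_arg)]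
  (comma_idx.foldl (pvAstep func_arg) ([], 0)).1

-- ===== PORT B =====
-- the body of B's for-loop: split at a depth-0 comma, otherwise update depth and push onto the buffer
def pvBstep (st : List String × List Char × Int) (ch : Char) : List String × List Char × Int :=
  if ch = ',' ∧ st.2.2 = 0 then
    (st.1 ++ [String.ofList st.2.1], [], st.2.2)
  else
    let depth : Int := if ch = '(' then st.2.2 + 1 else if ch = ')' then st.2.2 - 1 else st.2.2
    (st.1, st.2.1 ++ [ch], depth)

def parse_function_arguments_alt (func_arg : String) : List String :=
  let st := func_arg.toList.foldl pvBstep ([], [], 0)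
  if st.2.2 = 0 then st.1 ++ [String.ofList st.2.1] else st.1

-- ===== PRECONDITION & SPEC =====
-- On strings whose first character is a comma and whose tail has a parenthesis-balanced split point
-- (a later comma, or the end, preceded by equally many opening and closing parentheses), the falsy
-- test on last_idx in A treats the successful split at index 0 as if no split had happened and leaves
-- the leading comma inside the next emitted segment (',a' -> ['', ',a']); B returns the intended
-- split ['', 'a'].
def D_parse_function_arguments (func_arg : String) : Prop :=
  func_arg.toList.head? = some ',' ∧
  ∃ i < func_arg.toList.length, (func_arg.toList.tail ++ [','])[i]? = some ',' ∧
    (func_arg.toList.tail.take i).count '(' = (func_arg.toList.tail.take i).count ')'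
instance (func_arg : String) : Decidable (D_parse_function_arguments func_arg) := by
  unfold D_parse_function_arguments; infer_instance

def Spec_parse_function_arguments (func_arg : String) (out : List String) : Prop :=
  ¬ D_parse_function_arguments func_arg → out = parse_function_arguments_alt func_arg
instance (func_arg : String) (out : List String) : Decidable (Spec_parse_function_arguments func_arg out) := by
  unfold Spec_parse_function_arguments; infer_instance

def pvDiffWitness_parse_function_arguments : String := ","
def pvDiffWitnessOut_parse_function_arguments : (List String) × (List String) := (["", ","], ["", ""])

-- ===== CLAIM (what is proved, stated in full; the proofs are below) =====
def Claim_unchanged_parse_function_arguments : Prop := ∀ (func_arg : String), Dom_parse_function_arguments func_arg → Spec_parse_function_arguments func_arg (parse_function_arguments func_arg)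
def Claim_changed_parse_function_arguments : Prop := Dom_parse_function_arguments (pvDiffWitness_parse_function_arguments) ∧ D_parse_function_arguments (pvDiffWitness_parse_function_arguments) ∧ parse_function_arguments (pvDiffWitness_parse_function_arguments) = pvDiffWitnessOut_parse_function_arguments.1 ∧ parse_function_arguments_alt (pvDiffWitness_parse_function_arguments) = pvDiffWitnessOut_parse_function_arguments.2 ∧ pvDiffWitnessOut_parse_function_arguments.1 ≠ pvDiffWitnessOut_parse_function_arguments.2
def Claim_exact_parse_function_arguments : Prop := ∀ (func_arg : String), Dom_parse_function_arguments func_arg → D_parse_function_arguments func_arg → parse_function_arguments func_arg ≠ parse_function_arguments_alt func_arg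

-- ===== LEMMAS AND PROOFS =====

def pvCpos : List Char → List Nat
  | [] => []
  | c :: cs => (if c = ',' then [0] else []) ++ (pvCpos cs).map (· + 1)

def pvStep (s : List Char) (st : List String × Nat) (p : Nat) : List String × Nat :=
  let t : Nat := if st.2 = 0 then 0 else st.2 + 1
  let seg : List Char := (s.drop t).take (p - t)
  if seg.count '(' = seg.count ')' then (st.1 ++ [String.ofList seg], p) else st

def pvH : List Char → List Char → List String
  | buf, [] => if buf.count '(' = buf.count ')' then [String.ofList buf] else []
  | buf, c :: cs =>
    if c = ',' ∧ buf.count '(' = buf.count ')' then String.ofList buf :: pvH [] cs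
    else pvH (buf ++ [c]) cs

theorem pv_count_go_single (c : Char) :
    ∀ (fuel : Nat) (l : List Char) (acc : Nat), l.length ≤ fuel →
      PySem.Chars.count.go [c] fuel l acc = acc + l.count c := by
  intro fuel
  induction fuel with
  | zero =>
    intro l acc h
    have : l = [] := List.eq_nil_of_length_eq_zero (Nat.le_zero.mp h)
    subst this
    simp [PySem.Chars.count.go]
  | succ n ih =>
    intro l acc h
    cases l with
    | nil => simp [PySem.Chars.count.go]
    | cons x t =>
      rw [PySem.Chars.count.go]
      simp only [List.isPrefixOf, List.isPrefixOf_nil_left, Bool.and_true, List.length_cons,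
        List.length_nil, Nat.zero_add, List.drop_succ_cons, List.drop_zero]
      simp only [List.length_cons] at h
      by_cases hx : c = x
      · subst hx
        simp only [beq_self_eq_true, if_pos]
        rw [ih t (acc+1) (by omega)]
        simp [List.count_cons]
        omega
      · have hb : (c == x) = false := beq_eq_false_iff_ne.mpr hx
        have hb' : (x == c) = false := beq_eq_false_iff_ne.mpr (Ne.symm hx)
        simp only [hb, Bool.false_eq_true, if_neg, not_false_iff]
        rw [ih t acc (by omega)]
        simp [List.count_cons, hb']

theorem pv_count_single (l : List Char) (c : Char) :
    PySem.Chars.count l [c] = l.count c := by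
  rw [PySem.Chars.count]
  simp only [List.isEmpty_cons, if_neg, Bool.false_eq_true, not_false_iff]
  exact (pv_count_go_single c l.length l 0 le_rfl).trans (by omega)

theorem pvB_fold (cs : List Char) : ∀ (args : List String) (buf : List Char),
    (let r := cs.foldl pvBstep (args, buf, (buf.count '(' : Int) - (buf.count ')' : Int));
     if r.2.2 = 0 then r.1 ++ [String.ofList r.2.1] else r.1) = args ++ pvH buf cs := by
  induction cs with
  | nil =>
    intro args buf
    simp only [List.foldl_nil, pvH]
    by_cases hb : buf.count '(' = buf.count ')'
    · rw [if_pos (by omega), if_pos hb]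
    · rw [if_neg (by omega), if_neg hb]
      simp
  | cons c cs ih =>
    intro args buf
    simp only [List.foldl_cons, pvH]
    by_cases hc : c = ',' ∧ buf.count '(' = buf.count ')'
    · rw [if_pos hc]
      have hstep : pvBstep (args, buf, (buf.count '(' : Int) - (buf.count ')' : Int)) c
          = (args ++ [String.ofList buf], [], ((List.count '(' ([]:List Char) : Int) - (List.count ')' ([]:List Char) : Int))) := by
        simp [pvBstep, hc.1, hc.2]
      rw [hstep]
      rw [ih (args ++ [String.ofList buf]) []]
      simp
    · rw [if_neg hc]
      have hd : (if c = '(' then ((buf.count '(' : Int) - (buf.count ')' : Int)) + 1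
            else if c = ')' then ((buf.count '(' : Int) - (buf.count ')' : Int)) - 1
            else ((buf.count '(' : Int) - (buf.count ')' : Int)))
          = (((buf ++ [c]).count '(' : Int) - ((buf ++ [c]).count ')' : Int)) := by
        by_cases h1 : c = '('
        · subst h1; simp [List.count_append]; ring
        · by_cases h2 : c = ')'
          · subst h2; simp [List.count_append]; ring
          · simp [h1, h2, List.count_append, List.count_singleton,
              beq_eq_false_iff_ne.mpr h1, beq_eq_false_iff_ne.mpr h2]
      have hstep : pvBstep (args, buf, (buf.count '(' : Int) - (buf.count ')' : Int)) c
          = (args, buf ++ [c], (((buf ++ [c]).count '(' : Int) - ((buf ++ [c]).count ')' : Int))) := by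
        have hcond : ¬(c = ',' ∧ ((buf.count '(' : Int) - (buf.count ')' : Int)) = 0) := by
          intro hh; exact hc ⟨hh.1, by omega⟩
        simp only [pvBstep]
        rw [if_neg hcond, hd]
      rw [hstep, ih args (buf ++ [c])]

theorem pvB_eq_pvH (s : String) : parse_function_arguments_alt s = pvH [] s.toList := by
  have := pvB_fold s.toList [] []
  simpa [parse_function_arguments_alt] using this

theorem pv_paren_toList : "(".toList = ['('] := rfl
theorem pv_paren2_toList : ")".toList = [')'] := rfl

theorem pv_seg_eq (s : String) (t p : Nat) :
    PySem.Str.slice s (some (t : Int)) (some (p : Int)) = String.ofList ((s.toList.drop t).take (p - t)) := by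
  apply String.toList_injective
  simp [PySem.List.slice_natCast]

theorem pvA_model (s : String) : ∀ (ps : List Nat) (acc : List String) (q : Nat),
    (ps.map (fun (n : Nat) => (n : Int))).foldl (pvAstep s) (acc, (q : Int)) =
      ((ps.foldl (pvStep s.toList) (acc, q)).1, ((ps.foldl (pvStep s.toList) (acc, q)).2 : Int)) := by
  intro ps
  induction ps with
  | nil => intro acc q; simp
  | cons p ps ih =>
    intro acc q
    rw [List.map_cons, List.foldl_cons, List.foldl_cons]
    have ht : (if (q : Int) = 0 then (q : Int) else (q : Int) + 1)
        = ((if q = 0 then 0 else q + 1 : Nat) : Int) := by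
      by_cases h : q = 0 <;> simp [h]
    have hstep : pvAstep s (acc, (q : Int)) (p : Int)
        = ((pvStep s.toList (acc, q) p).1, ((pvStep s.toList (acc, q) p).2 : Int)) := by
      rw [pvAstep, pvStep]
      simp only [ht, pv_seg_eq, PySem.Str.count_eq, String.toList_ofList,
        pv_paren_toList, pv_paren2_toList, pv_count_single]
      split_ifs <;> simp
    rw [hstep, ih (pvStep s.toList (acc, q) p).1 (pvStep s.toList (acc, q) p).2]

theorem pv_enum_filter (cs : List Char) : ∀ (k : Int),
    ((PySem.List.enumerate cs k).filter (fun p => p.2 == ',')).map (fun p => p.1) =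
      (pvCpos cs).map (fun (n : Nat) => (n : Int) + k) := by
  induction cs with
  | nil => intro k; simp [PySem.List.enumerate_nil, pvCpos]
  | cons c cs ih =>
    intro k
    rw [PySem.List.enumerate_cons, pvCpos]
    by_cases hc : c = ','
    · subst hc
      simp only [List.filter_cons, List.map_cons, if_pos]
      rw [List.map_append]
      simp only [beq_self_eq_true, if_pos]
      rw [List.map_cons, ih (k + 1)]
      simp only [List.map_cons, List.map_nil, List.map_map, List.cons_append, List.nil_append,
        Nat.cast_zero, zero_add]
      congr 1
      apply List.map_congr_left
      intro n _
      simp only [Function.comp]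
      push_cast
      ring
    · have hb : (c == ',') = false := beq_eq_false_iff_ne.mpr hc
      simp only [List.filter_cons, hb, Bool.false_eq_true, if_neg, not_false_iff, if_false]
      rw [ih (k + 1)]
      simp only [hc, if_neg, Bool.false_eq_true, not_false_iff, if_false, List.nil_append,
        List.map_map]
      apply List.map_congr_left
      intro n _
      simp [Function.comp]
      push_cast
      ring

theorem pvCpos_nocomma (u : List Char) (hu : ∀ c ∈ u, c ≠ ',') : pvCpos u = [] := by
  induction u with
  | nil => rfl
  | cons c cs ih =>
    rw [pvCpos, ih (fun d hd => hu d (List.mem_cons_of_mem c hd))]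
    simp [hu c (List.mem_cons_self)]

theorem pvCpos_append (u v : List Char) (hu : ∀ c ∈ u, c ≠ ',') :
    pvCpos (u ++ ',' :: v) = u.length :: (pvCpos v).map (· + (u.length + 1)) := by
  induction u with
  | nil => simp [pvCpos]
  | cons c cs ih =>
    rw [List.cons_append, pvCpos, ih (fun d hd => hu d (List.mem_cons_of_mem c hd))]
    simp only [hu c (List.mem_cons_self), if_neg, not_false_iff, if_false, List.nil_append,
      List.map_cons, List.map_map, List.length_cons]
    congr 1

theorem pvH_append_nocomma (u : List Char) : ∀ (buf w : List Char), (∀ c ∈ u, c ≠ ',') →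
    pvH buf (u ++ w) = pvH (buf ++ u) w := by
  induction u with
  | nil => intro buf w _; simp
  | cons c cs ih =>
    intro buf w hu
    rw [List.cons_append, pvH]
    rw [if_neg (fun hh => hu c List.mem_cons_self hh.1)]
    rw [ih (buf ++ [c]) w (fun d hd => hu d (List.mem_cons_of_mem c hd))]
    simp

-- drop/take decompositions

theorem pv_drop_decomp (s : List Char) (a b : Nat) (hab : a ≤ b) :
    s.drop a = (s.drop a).take (b - a) ++ s.drop b := by
  conv_lhs => rw [← List.take_append_drop (b - a) (s.drop a)]
  rw [List.drop_drop]
  congr 2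
  omega

theorem pv_first_comma (v : List Char) :
    (∀ c ∈ v, c ≠ ',') ∨ ∃ u v', (∀ c ∈ u, c ≠ ',') ∧ v = u ++ ',' :: v' := by
  induction v with
  | nil => left; simp
  | cons c cs ih =>
    by_cases hc : c = ','
    · subst hc; right; exact ⟨[], cs, by simp⟩
    · rcases ih with h | ⟨u, v', hu, hv⟩
      · left; intro d hd
        rcases List.mem_cons.mp hd with rfl | hd
        · exact hc
        · exact h d hd
      · right; exact ⟨c :: u, v', by
          intro d hd
          rcases List.mem_cons.mp hd with rfl | hd
          · exact hc
          · exact hu d hd, by rw [hv]; rfl⟩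

theorem pvC : ∀ (n : Nat) (v s : List Char) (q r : Nat) (acc : List String),
    v.length ≤ n → 0 < q → q + 1 ≤ r → r + v.length = s.length → s.drop r = v →
    (((pvCpos v).map (· + r) ++ [s.length]).foldl (pvStep s) (acc, q)).1
      = acc ++ pvH ((s.drop (q + 1)).take (r - (q + 1))) v := by
  intro n
  induction n with
  | zero =>
    intro v s q r acc hn hq hqr hlen hdrop
    have hv : v = [] := List.eq_nil_of_length_eq_zero (Nat.le_zero.mp hn)
    subst hv
    rw [pvCpos, List.map_nil, List.nil_append, List.foldl_cons, List.foldl_nil, pvH]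
    have ht : ¬ (q = 0) := by omega
    have hseg : (s.drop (q+1)).take (s.length - (q+1)) = (s.drop (q+1)).take (r - (q+1)) := by
      rw [List.take_of_length_le (by simp only [List.length_drop]; omega)]
      rw [List.take_of_length_le (by simp only [List.length_drop]; omega)]
    rw [pvStep]
    simp only [ht, if_neg, not_false_iff, if_false, hseg]
    split_ifs with hb
    · simp
    · simp
  | succ n ih =>
    intro v s q r acc hn hq hqr hlen hdrop
    have hbuf : s.drop (q+1) = (s.drop (q+1)).take (r - (q+1)) ++ v := by
      rw [← hdrop]; exact pv_drop_decomp s (q+1) r (by omega)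
    rcases pv_first_comma v with hnc | ⟨u, v', hu, rfl⟩
    · rw [pvCpos_nocomma v hnc, List.map_nil, List.nil_append, List.foldl_cons, List.foldl_nil]
      have hHv := pvH_append_nocomma v ((s.drop (q+1)).take (r - (q+1))) [] hnc
      rw [List.append_nil] at hHv
      rw [hHv, pvStep]
      have ht : ¬ (q = 0) := by omega
      have hseg : (s.drop (q+1)).take (s.length - (q+1)) = (s.drop (q+1)).take (r - (q+1)) ++ v := by
        rw [List.take_of_length_le (by simp only [List.length_drop]; omega)]
        exact hbuf
      simp only [ht, if_neg, not_false_iff, if_false, hseg, pvH]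
      split_ifs with hb
      · simp
      · simp
    · -- v = u ++ ',' :: v'
      rw [pvCpos_append u v' hu, List.map_cons, List.map_map, List.cons_append, List.foldl_cons]
      have hlen2 : (u ++ ',' :: v').length = u.length + 1 + v'.length := by
        rw [List.length_append, List.length_cons]; omega
      have hdropr : s.drop (r + u.length + 1) = v' := by
        have : (u ++ ',' :: v').drop (u.length + 1) = v' := by
          rw [List.drop_append]
          simp
        rw [← this, ← hdrop, List.drop_drop]
        congr 1
      have hmap : (pvCpos v').map ((· + r) ∘ (· + (u.length + 1)))
          = (pvCpos v').map (· + (r + u.length + 1)) := by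
        apply List.map_congr_left
        intro a _
        simp [Function.comp]
        omega
      have hseg : (s.drop (q+1)).take (u.length + r - (q+1))
          = (s.drop (q+1)).take (r - (q+1)) ++ u := by
        have h1 : (s.drop (q+1)).take ((r - (q+1)) + u.length)
            = (s.drop (q+1)).take (r - (q+1)) ++ ((s.drop (q+1)).drop (r - (q+1))).take u.length := by
          rw [← List.take_add]
        have h2 : (s.drop (q+1)).drop (r - (q+1)) = u ++ ',' :: v' := by
          rw [List.drop_drop, ← hdrop]
          congr 1
          omega
        have h3 : (u ++ ',' :: v').take u.length = u := List.take_left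
        rw [show u.length + r - (q+1) = (r - (q+1)) + u.length by omega, h1, h2, h3]
      rw [pvH_append_nocomma u _ (',' :: v') hu, pvH]
      rw [pvStep]
      have ht : ¬ (q = 0) := by omega
      simp only [ht, if_neg, not_false_iff, if_false, hseg, hmap]
      by_cases hb : ((s.drop (q+1)).take (r - (q+1)) ++ u).count '(' = ((s.drop (q+1)).take (r - (q+1)) ++ u).count ')'
      · rw [if_pos hb, if_pos ⟨by trivial, hb⟩]
        have hih := ih v' s (u.length + r) (u.length + r + 1) (acc ++ [String.ofList ((s.drop (q+1)).take (r - (q+1)) ++ u)])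
          (by omega) (by omega) (by omega) (by omega) (by rw [show u.length + r + 1 = r + u.length + 1 by omega]; exact hdropr)
        rw [show r + u.length + 1 = u.length + r + 1 by omega]
        rw [hih]
        simp only [Nat.sub_self, List.take_zero, List.append_assoc, List.singleton_append]
      · rw [if_neg hb, if_neg (fun hh => hb hh.2)]
        have hih := ih v' s q (r + u.length + 1) acc
          (by omega) hq (by omega) (by omega) hdropr
        rw [hih]
        have hbuf' : (s.drop (q+1)).take (r + u.length + 1 - (q+1))
            = ((s.drop (q+1)).take (r - (q+1)) ++ u) ++ [','] := by
          have h1 : (s.drop (q+1)).take ((r - (q+1)) + (u.length + 1))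
              = (s.drop (q+1)).take (r - (q+1)) ++ ((s.drop (q+1)).drop (r - (q+1))).take (u.length + 1) := by
            rw [← List.take_add]
          have h2 : (s.drop (q+1)).drop (r - (q+1)) = u ++ ',' :: v' := by
            rw [List.drop_drop, ← hdrop]
            congr 1
            omega
          have h3 : (u ++ ',' :: v').take (u.length + 1) = u ++ [','] := by
            rw [List.take_append]
            simp
          rw [show r + u.length + 1 - (q+1) = (r - (q+1)) + (u.length + 1) by omega, h1, h2, h3]
          simp [List.append_assoc]
        rw [hbuf']

theorem pvC0 : ∀ (n : Nat) (v s : List Char) (r : Nat) (acc : List String),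
    v.length ≤ n → r + v.length = s.length → s.drop r = v → (r = 0 → s.head? ≠ some ',') →
    (((pvCpos v).map (· + r) ++ [s.length]).foldl (pvStep s) (acc, 0)).1
      = acc ++ pvH (s.take r) v := by
  intro n
  induction n with
  | zero =>
    intro v s r acc hn hlen hdrop h0
    have hv : v = [] := List.eq_nil_of_length_eq_zero (Nat.le_zero.mp hn)
    subst hv
    rw [pvCpos, List.map_nil, List.nil_append, List.foldl_cons, List.foldl_nil, pvH]
    rw [pvStep]
    simp only [show (if (0:Nat) = 0 then (0:Nat) else 0 + 1) = 0 from rfl, show (if True then (0:Nat) else 0 + 1) = 0 from rfl, Nat.sub_zero, List.drop_zero]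
    have hseg : s.take s.length = s.take r := by
      rw [List.take_length, List.take_of_length_le (by omega)]
    rw [hseg]
    split_ifs with hb
    · simp
    · simp
  | succ n ih =>
    intro v s r acc hn hlen hdrop h0
    have hbuf : s = s.take r ++ v := by
      rw [← hdrop]; exact (List.take_append_drop r s).symm
    rcases pv_first_comma v with hnc | ⟨u, v', hu, rfl⟩
    · rw [pvCpos_nocomma v hnc, List.map_nil, List.nil_append, List.foldl_cons, List.foldl_nil]
      have hHv := pvH_append_nocomma v (s.take r) [] hnc
      rw [List.append_nil] at hHv
      rw [hHv, pvStep]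
      simp only [show (if (0:Nat) = 0 then (0:Nat) else 0 + 1) = 0 from rfl, show (if True then (0:Nat) else 0 + 1) = 0 from rfl, Nat.sub_zero, List.drop_zero, List.take_length]
      rw [← hbuf]
      split_ifs with hb
      · rw [pvH, if_pos hb]
      · rw [pvH, if_neg hb]
        simp
    · rw [pvCpos_append u v' hu, List.map_cons, List.map_map, List.cons_append, List.foldl_cons]
      have hlen2 : (u ++ ',' :: v').length = u.length + 1 + v'.length := by
        rw [List.length_append, List.length_cons]; omega
      have hdropr : s.drop (r + u.length + 1) = v' := by
        have : (u ++ ',' :: v').drop (u.length + 1) = v' := by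
          rw [List.drop_append]
          simp
        rw [← this, ← hdrop, List.drop_drop]
        congr 1
      have hmap : (pvCpos v').map ((· + r) ∘ (· + (u.length + 1)))
          = (pvCpos v').map (· + (r + u.length + 1)) := by
        apply List.map_congr_left
        intro a _
        simp [Function.comp]
        omega
      have hseg : s.take (u.length + r) = s.take r ++ u := by
        have h1 : s.take (r + u.length) = s.take r ++ (s.drop r).take u.length := by
          rw [← List.take_add]
        have h3 : (u ++ ',' :: v').take u.length = u := List.take_left
        rw [show u.length + r = r + u.length by omega, h1, hdrop, h3]
      rw [pvH_append_nocomma u _ (',' :: v') hu, pvH]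
      rw [pvStep]
      simp only [show (if (0:Nat) = 0 then (0:Nat) else 0 + 1) = 0 from rfl, show (if True then (0:Nat) else 0 + 1) = 0 from rfl, Nat.sub_zero, List.drop_zero, hseg, hmap]
      by_cases hb : (s.take r ++ u).count '(' = (s.take r ++ u).count ')'
      · rw [if_pos hb, if_pos ⟨by trivial, hb⟩]
        have hpos : 0 < u.length + r := by
          rcases Nat.eq_zero_or_pos (u.length + r) with hz | hp
          · exfalso
            have hr0 : r = 0 := by omega
            have hu0 : u = [] := List.eq_nil_of_length_eq_zero (by omega)
            subst hu0
            apply h0 hr0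
            have h5 := hr0 ▸ hdrop
            rw [List.drop_zero] at h5
            rw [h5]
            simp
          · exact hp
        have hih := pvC n v' s (u.length + r) (u.length + r + 1)
          (acc ++ [String.ofList (s.take r ++ u)])
          (by omega) hpos (by omega) (by omega)
          (by rw [show u.length + r + 1 = r + u.length + 1 by omega]; exact hdropr)
        rw [show r + u.length + 1 = u.length + r + 1 by omega]
        rw [hih]
        simp only [Nat.sub_self, List.take_zero, List.append_assoc, List.singleton_append]
      · rw [if_neg hb, if_neg (fun hh => hb hh.2)]
        have hih := ih v' s (r + u.length + 1) acc
          (by omega) (by omega) hdropr (by omega)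
        rw [hih]
        have hbuf' : s.take (r + u.length + 1) = (s.take r ++ u) ++ [','] := by
          have h1 : s.take (r + (u.length + 1)) = s.take r ++ (s.drop r).take (u.length + 1) := by
            rw [← List.take_add]
          have h3 : (u ++ ',' :: v').take (u.length + 1) = u ++ [','] := by
            rw [List.take_append]
            simp
          rw [show r + u.length + 1 = r + (u.length + 1) by omega, h1, hdrop, h3]
          simp [List.append_assoc]
        rw [hbuf']

theorem pvN (v : List Char) : ∀ (buf : List Char),
    (∀ i, i ≤ v.length → (i = v.length ∨ v[i]? = some ',') →
      (buf ++ v.take i).count '(' ≠ (buf ++ v.take i).count ')') →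
    pvH buf v = [] := by
  induction v with
  | nil =>
    intro buf h
    rw [pvH]
    rw [if_neg (by simpa using h 0 le_rfl (Or.inl rfl))]
  | cons c cs ih =>
    intro buf h
    rw [pvH]
    rw [if_neg (by
      rintro ⟨rfl, hb⟩
      exact h 0 (by omega) (Or.inr rfl) (by simpa using hb))]
    apply ih
    intro i hi hcond
    have := h (i + 1) (by simpa using Nat.succ_le_succ hi) (by
      rcases hcond with h1 | h2
      · left; simp [h1]
      · right; simpa using h2)
    simpa [List.append_assoc] using this

theorem pvA_eq (s : String) :
    parse_function_arguments s =
      (((pvCpos s.toList).map (· + 0) ++ [s.toList.length]).foldl (pvStep s.toList) ([], 0)).1 := by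
  rw [parse_function_arguments]
  have hlen : PySem.Str.len s = (s.toList.length : Int) := by
    simp [PySem.Str.len_eq]
  rw [pv_enum_filter s.toList 0]
  have hcast : (pvCpos s.toList).map (fun (n : Nat) => (n : Int) + 0)
      ++ [(s.toList.length : Int)]
      = (((pvCpos s.toList).map (· + 0)) ++ [s.toList.length]).map (fun (n : Nat) => (n : Int)) := by
    simp [List.map_map, Function.comp]
  rw [hlen, hcast]
  have hm := pvA_model s ((pvCpos s.toList).map (· + 0) ++ [s.toList.length]) [] 0
  rw [show ((0:Nat):Int) = (0:Int) from rfl] at hm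
  rw [hm]

theorem pvM (t : List Char) : ∀ (buf buf' : List Char),
    buf.count '(' = buf'.count '(' → buf.count ')' = buf'.count ')' →
    buf.length ≠ buf'.length →
    (∃ i, i ≤ t.length ∧ (i = t.length ∨ t[i]? = some ',') ∧
      (buf ++ t.take i).count '(' = (buf ++ t.take i).count ')') →
    pvH buf t ≠ pvH buf' t := by
  induction t with
  | nil =>
    intro buf buf' h1 h2 hlen hex
    obtain ⟨i, hi, _, hbal⟩ := hex
    have hi0 : i = 0 := by simpa using hi
    subst hi0
    simp only [List.take_nil, List.append_nil] at hbal
    rw [pvH, pvH, if_pos hbal, if_pos (by rw [← h1, ← h2]; exact hbal)]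
    intro hcontra
    have := List.head_eq_of_cons_eq hcontra
    have : buf = buf' := by
      have h3 := congrArg String.toList this
      simpa using h3
    exact hlen (by rw [this])
  | cons c cs ih =>
    intro buf buf' h1 h2 hlen hex
    rw [pvH, pvH]
    by_cases hc : c = ',' ∧ buf.count '(' = buf.count ')'
    · rw [if_pos hc, if_pos ⟨hc.1, by rw [← h1, ← h2]; exact hc.2⟩]
      intro hcontra
      have := List.head_eq_of_cons_eq hcontra
      have hbb : buf = buf' := by
        have h3 := congrArg String.toList this
        simpa using h3
      exact hlen (by rw [hbb])
    · rw [if_neg hc, if_neg (by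
        rintro ⟨hc1, hc2⟩
        exact hc ⟨hc1, by rw [h1, h2]; exact hc2⟩)]
      apply ih (buf ++ [c]) (buf' ++ [c])
        (by simp [List.count_append, h1]) (by simp [List.count_append, h2])
        (by simpa using hlen)
      obtain ⟨i, hi, hcond, hbal⟩ := hex
      have hipos : 0 < i := by
        rcases Nat.eq_zero_or_pos i with rfl | hp
        · exfalso
          rcases hcond with hl | hr
          · simp at hl
          · simp at hr
            apply hc
            refine ⟨hr, ?_⟩
            simpa using hbal
        · exact hp
      refine ⟨i - 1, by simp at hi; omega, ?_, ?_⟩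
      · rcases hcond with hl | hr
        · left; simp at hl ⊢; omega
        · right
          have : (c :: cs)[i]? = cs[i-1]? := by
            rcases Nat.exists_eq_add_of_lt hipos with ⟨j, hj⟩
            subst hj
            simp
          rw [← this]; exact hr
      · have : buf ++ [c] ++ cs.take (i - 1) = buf ++ (c :: cs).take i := by
          rcases Nat.exists_eq_add_of_lt hipos with ⟨j, hj⟩
          subst hj
          simp
        rw [this]
        exact hbal

theorem pv_pad_comma (t : List Char) (i : Nat) (hi : i ≤ t.length) :
    ((t ++ [','])[i]? = some ',') ↔ (i = t.length ∨ t[i]? = some ',') := by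
  rcases eq_or_lt_of_le hi with rfl | h
  · simp
  · rw [List.getElem?_append_left h]
    simp [Nat.ne_of_lt h]

-- A on a leading-comma string: the split at index 0 succeeds but last_idx stays 0,
-- so the loop continues in take_index = 0 mode with the comma still in every slice
theorem pvA_comma (t : List Char) (s : List Char) (hst : s = ',' :: t) :
    (((pvCpos s).map (· + 0) ++ [s.length]).foldl (pvStep s) ([], 0)).1
      = [String.ofList []] ++ pvH (s.take 1) t := by
  subst hst
  have hcp : pvCpos (',' :: t) = 0 :: (pvCpos t).map (· + 1) := by simp [pvCpos]
  rw [hcp]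
  have hmap : ((0 :: (pvCpos t).map (· + 1)).map (· + 0)) = 0 :: (pvCpos t).map (· + 1) := by
    simp
  rw [hmap, List.cons_append, List.foldl_cons]
  have hstep : pvStep (',' :: t) (([] : List String), 0) 0 = ([String.ofList []], 0) := by
    rw [pvStep]
    simp
  rw [hstep]
  exact pvC0 t.length t (',' :: t) 1 [String.ofList []] le_rfl
    (by rw [List.length_cons]; omega) (by simp) (by omega)

-- ===== VERDICT (by name: the statement is the Claim_ definition above) =====
theorem parse_function_arguments_spec : Claim_unchanged_parse_function_arguments := by
  unfold Claim_unchanged_parse_function_arguments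
  intro s _
  unfold Spec_parse_function_arguments
  intro hD
  unfold D_parse_function_arguments at hD
  rw [pvA_eq s, pvB_eq_pvH s]
  by_cases hh : s.toList.head? = some ','
  · obtain ⟨t, ht⟩ : ∃ t, s.toList = ',' :: t := by
      cases hsl : s.toList with
      | nil => rw [hsl] at hh; simp at hh
      | cons c t =>
        rw [hsl] at hh
        simp at hh
        exact ⟨t, by rw [hh]⟩
    have htail : s.toList.tail = t := by rw [ht]; rfl
    have hany := fun h => hD ⟨hh, h⟩
    rw [htail, ht] at hany
    have hfacts : ∀ i, i ≤ t.length → (i = t.length ∨ t[i]? = some ',') →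
        (t.take i).count '(' ≠ (t.take i).count ')' := by
      intro i hi hcond heq
      exact hany ⟨i, by simp; omega, (pv_pad_comma t i hi).mpr hcond, heq⟩
    rw [pvA_comma t s.toList ht, ht]
    rw [show ((',' :: t).take 1) = [','] from rfl]
    rw [pvH]
    rw [if_pos ⟨rfl, rfl⟩]
    rw [pvN t [','] (by
      intro i hi hcond
      have := hfacts i hi hcond
      simpa using this)]
    rw [pvN t [] (by
      intro i hi hcond
      have := hfacts i hi hcond
      simpa using this)]
    rfl
  · have h := pvC0 s.toList.length s.toList s.toList 0 [] le_rfl (by simp) (by simp)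
      (fun _ => hh)
    simpa using h

theorem parse_function_arguments_changed : Claim_changed_parse_function_arguments := by
  unfold Claim_changed_parse_function_arguments; decide

theorem parse_function_arguments_tight : Claim_exact_parse_function_arguments := by
  unfold Claim_exact_parse_function_arguments
  intro s _ hDD
  unfold D_parse_function_arguments at hDD
  obtain ⟨hh, hany⟩ := hDD
  obtain ⟨t, ht⟩ : ∃ t, s.toList = ',' :: t := by
    cases hsl : s.toList with
    | nil => rw [hsl] at hh; simp at hh
    | cons c t =>
      rw [hsl] at hh
      simp at hh
      exact ⟨t, by rw [hh]⟩
  have htail : s.toList.tail = t := by rw [ht]; rfl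
  rw [htail, ht] at hany
  rw [pvA_eq s, pvB_eq_pvH s, pvA_comma t s.toList ht, ht]
  rw [show ((',' :: t).take 1) = [','] from rfl]
  rw [pvH, if_pos ⟨rfl, rfl⟩]
  intro hcontra
  have htails : pvH [','] t = pvH [] t := by simpa using hcontra
  apply pvM t [','] [] (by simp) (by simp) (by simp) ?_ htails
  obtain ⟨i, hi, hcond, hbal⟩ := hany
  have hi' : i ≤ t.length := by simp at hi; omega
  exact ⟨i, hi', (pv_pad_comma t i hi').mp hcond, by simpa using hbal⟩
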